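-- pv_equiv track=rewrite | github.com/core-not-dumped/Baekjoon_Coding | 16565.py | fcard_n_line_not_exist
-- ===== SOURCE A (Python) =====
-- from math import comb
--
-- def fcard_n_line_not_exist(line_num, remain_n):
--     if remain_n == 0:   return 1
--     if remain_n in [1,2,3]: return comb(line_num*4, remain_n)
--     if remain_n > line_num * 3: return 0
--
--     total = comb(line_num*4, remain_n)
--     remove = 0
--     for i in range(1, remain_n//4+1):
--         remove += comb(line_num, i) * fcard_n_line_not_exist(line_num-i, remain_n - 4*i)
--     return (total - remove)%10007
-- ===== SOURCE B (Python) =====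
-- from math import comb
--
-- def fcard_n_line_not_exist(line_num, remain_n):
--     # Bottom-up DP over the remain_n//4+1 reachable states (line_num-d, remain_n-4*d).
--     if remain_n == 0:
--         return 1
--     if 1 <= remain_n <= 3:
--         return comb(4 * line_num, remain_n)
--     if remain_n > 3 * line_num:
--         return 0
--     D = remain_n // 4
--     suffix = []  # suffix[j] holds the value for state d+1+j
--     for d in range(D, -1, -1):
--         L = line_num - d
--         n = remain_n - 4 * d
--         if n == 0:
--             v = 1
--         elif n <= 3:
--             v = comb(4 * L, n)
--         elif n > 3 * L:
--             v = 0
--         else: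
--             remove = sum(comb(L, i) * suffix[i - 1] for i in range(1, n // 4 + 1))
--             v = (comb(4 * L, n) - remove) % 10007
--         suffix.insert(0, v)
--     return suffix[0]
-- ===== Notes on version B (the rewrite author's own statement) =====
-- stated objective: alternative
-- what changed: Replaces A's naive top-down recursion (overlapping subproblems recomputed) with a bottom-up dynamic program over the remain_n//4+1 reachable states (line_num-d, remain_n-4d), each computed once.
import Mathlib
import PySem

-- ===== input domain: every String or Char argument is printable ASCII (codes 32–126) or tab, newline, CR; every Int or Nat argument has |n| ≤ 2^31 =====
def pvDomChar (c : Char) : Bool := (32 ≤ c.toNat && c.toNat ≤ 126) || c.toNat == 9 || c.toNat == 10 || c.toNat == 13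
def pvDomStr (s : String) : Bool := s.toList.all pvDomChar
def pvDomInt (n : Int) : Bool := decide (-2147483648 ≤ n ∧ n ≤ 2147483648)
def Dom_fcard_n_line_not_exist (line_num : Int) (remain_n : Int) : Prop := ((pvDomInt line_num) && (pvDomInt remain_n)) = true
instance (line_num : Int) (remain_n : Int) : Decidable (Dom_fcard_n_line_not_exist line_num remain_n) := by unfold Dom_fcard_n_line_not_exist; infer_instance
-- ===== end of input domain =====

-- B replaces A's naive recursion (overlapping subproblems recomputed) by a bottom-up DP
-- over the remain_n//4+1 reachable states (line_num-d, remain_n-4d), each computed once.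

-- math.comb m k for 0 ≤ m, 0 ≤ k (exact there; Python raises on a negative argument,
-- which Pre_ excludes)
def pycomb (m k : Int) : Int := (Nat.choose m.toNat k.toNat : Int)

-- ===== PORT A =====
def fcard_n_line_not_exist (line_num : Int) (remain_n : Int) : Int :=
  if remain_n = 0 then 1
  else if remain_n = 1 ∨ remain_n = 2 ∨ remain_n = 3 then pycomb (line_num * 4) remain_n
  else if remain_n > line_num * 3 then 0
  else
    let total := pycomb (line_num * 4) remain_n
    let remove := (PySem.List.pyRange 1 (PySem.Int.floordiv remain_n 4 + 1) 1).attach.foldl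
      (fun acc i => acc + pycomb line_num i.1 * fcard_n_line_not_exist (line_num - i.1) (remain_n - 4 * i.1)) 0
    PySem.Int.mod (total - remove) 10007
termination_by remain_n.toNat
decreasing_by
  rename_i i
  have hmem := PySem.List.mem_pyRange_one.mp i.2
  have hfd : PySem.Int.floordiv remain_n 4 = remain_n / 4 :=
    PySem.Int.floordiv_eq_ediv_of_pos (by norm_num)
  omega

-- ===== PORT B =====
-- body of Source B's loop at index d, reading already-computed states from suffix
-- (the out-of-range default 0 of pyGetD is never used on Pre_: Source B's suffix[i-1] is in range)
def pvBstep (line_num : Int) (remain_n : Int) (d : Int) (suffix : List Int) : Int :=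
  let L := line_num - d
  let n := remain_n - 4 * d
  if n = 0 then 1
  else if n ≤ 3 then pycomb (4 * L) n
  else if n > 3 * L then 0
  else
    let remove := (PySem.List.pyRange 1 (PySem.Int.floordiv n 4 + 1) 1).foldl
      (fun acc i => acc + pycomb L i * PySem.List.pyGetD suffix (i - 1) 0) 0
    PySem.Int.mod (pycomb (4 * L) n - remove) 10007

-- Source B's 'for d in range(D, -1, -1)' as recursion on the remaining iteration count
-- (k iterations left means the current index is d = k-1), state = suffix
def pvBloop (line_num : Int) (remain_n : Int) : Nat → List Int → List Int
  | 0, suffix => suffix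
  | k + 1, suffix => pvBloop line_num remain_n k (pvBstep line_num remain_n (k : Int) suffix :: suffix)

def fcard_n_line_not_exist_alt (line_num : Int) (remain_n : Int) : Int :=
  if remain_n = 0 then 1
  else if 1 ≤ remain_n ∧ remain_n ≤ 3 then pycomb (4 * line_num) remain_n
  else if remain_n > 3 * line_num then 0
  else
    let D := PySem.Int.floordiv remain_n 4
    let suffix := pvBloop line_num remain_n (D.toNat + 1) []
    PySem.List.pyGetD suffix 0 0

-- ===== PRECONDITION & SPEC =====
-- Pre_ is exactly the set of inputs on which Python A returns (everywhere else math.comb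
-- raises ValueError on a negative argument): remain_n = 0; or 1 ≤ remain_n ≤ 3 with
-- 0 ≤ line_num; or 4 ≤ remain_n; or remain_n < 0 with 3*line_num < remain_n.
def Pre_fcard_n_line_not_exist (line_num : Int) (remain_n : Int) : Prop :=
  remain_n = 0 ∨ (1 ≤ remain_n ∧ remain_n ≤ 3 ∧ 0 ≤ line_num) ∨ 4 ≤ remain_n ∨
    (remain_n < 0 ∧ 3 * line_num < remain_n)
instance (line_num : Int) (remain_n : Int) : Decidable (Pre_fcard_n_line_not_exist line_num remain_n) := by
  unfold Pre_fcard_n_line_not_exist; infer_instance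
def pvWitness_fcard_n_line_not_exist : Int × Int := (2, 5)
def Spec_fcard_n_line_not_exist (line_num : Int) (remain_n : Int) (out : Int) : Prop := out = fcard_n_line_not_exist_alt line_num remain_n
instance (line_num : Int) (remain_n : Int) (out : Int) : Decidable (Spec_fcard_n_line_not_exist line_num remain_n out) := by unfold Spec_fcard_n_line_not_exist; infer_instance

-- ===== CLAIM (what is proved, stated in full; the proofs are below) =====
def Claim_equal_fcard_n_line_not_exist : Prop := ∀ (line_num : Int) (remain_n : Int), Dom_fcard_n_line_not_exist line_num remain_n → Pre_fcard_n_line_not_exist line_num remain_n → Spec_fcard_n_line_not_exist line_num remain_n (fcard_n_line_not_exist line_num remain_n)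

-- ===== LEMMAS AND PROOFS =====

-- One loop step of B computes A's value for state d = j, given that suffix already holds
-- A's values for the states j+1 … remain_n/4.
lemma pv_step_eq (line_num remain_n : Int) (hn : 4 ≤ remain_n) (j : Nat)
    (hj : (j : Int) ≤ remain_n / 4) (suffix : List Int)
    (hs : suffix = (List.range' (j + 1) ((remain_n / 4).toNat - j)).map
        (fun (m : Nat) => fcard_n_line_not_exist (line_num - (m : Int)) (remain_n - 4 * (m : Int)))) :
    pvBstep line_num remain_n (j : Int) suffix
      = fcard_n_line_not_exist (line_num - (j : Int)) (remain_n - 4 * (j : Int)) := by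
  have hfd : ∀ a : Int, PySem.Int.floordiv a 4 = a / 4 :=
    fun a => PySem.Int.floordiv_eq_ediv_of_pos (by norm_num)
  have hn0 : (0:Int) ≤ remain_n - 4 * (j:Int) := by omega
  rw [pvBstep, fcard_n_line_not_exist]
  simp only []
  split_ifs with h1 h2 h3 h4 h5 h6 h7 h8 h9
  all_goals try rfl
  all_goals try omega
  all_goals try rw [mul_comm]
  -- main branch: both folds run over range(1, n//4+1); suffix[i-1] is A's value at state j+i
  rw [List.foldl_attach (f := fun acc i => acc + pycomb (line_num - (j:Int)) i *
    fcard_n_line_not_exist (line_num - (j:Int) - i) (remain_n - 4 * (j:Int) - 4 * i))]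
  have hrm : (PySem.List.pyRange 1 (PySem.Int.floordiv (remain_n - 4 * (j:Int)) 4 + 1) 1).foldl
      (fun acc i => acc + pycomb (line_num - (j:Int)) i * PySem.List.pyGetD suffix (i - 1) 0) 0
    = (PySem.List.pyRange 1 (PySem.Int.floordiv (remain_n - 4 * (j:Int)) 4 + 1) 1).foldl
      (fun acc i => acc + pycomb (line_num - (j:Int)) i *
        fcard_n_line_not_exist (line_num - (j:Int) - i) (remain_n - 4 * (j:Int) - 4 * i)) 0 := by
    apply PySem.List.foldl_congr_mem
    intro acc i hi
    have hib := PySem.List.mem_pyRange_one.mp hi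
    rw [hfd] at hib
    have hdiv : (remain_n - 4 * (j:Int)) / 4 = remain_n / 4 - j := by omega
    have hi1 : 1 ≤ i := hib.1
    have hi2 : i ≤ remain_n / 4 - (j:Int) := by omega
    have hget : PySem.List.pyGetD suffix (i - 1) 0
        = fcard_n_line_not_exist (line_num - (j:Int) - i) (remain_n - 4 * (j:Int) - 4 * i) := by
      rw [hs, PySem.List.pyGetD_eq_getElem _ _ (by omega)
        (by simp [List.length_range']; omega)]
      rw [List.getElem_map, List.getElem_range']
      congr 1 <;> push_cast <;> omega
    rw [hget]
  rw [hrm]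

-- Loop invariant: running the remaining k iterations on a suffix holding A's values for
-- states k … remain_n/4 yields A's values for all states 0 … remain_n/4.
lemma pv_loop_eq (line_num remain_n : Int) (hn : 4 ≤ remain_n) :
    ∀ (k : Nat), k ≤ (remain_n / 4).toNat + 1 →
      pvBloop line_num remain_n k
        ((List.range' k ((remain_n / 4).toNat + 1 - k)).map
          (fun (m : Nat) => fcard_n_line_not_exist (line_num - (m : Int)) (remain_n - 4 * (m : Int))))
      = (List.range' 0 ((remain_n / 4).toNat + 1)).map
          (fun (m : Nat) => fcard_n_line_not_exist (line_num - (m : Int)) (remain_n - 4 * (m : Int))) := by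
  have hD1 : (1:Int) ≤ remain_n / 4 := by omega
  intro k
  induction k with
  | zero => intro _; rfl
  | succ k ih =>
    intro hk
    rw [pvBloop]
    have hlen : (remain_n / 4).toNat + 1 - (k + 1) = (remain_n / 4).toNat - k := by omega
    rw [hlen]
    rw [pv_step_eq line_num remain_n hn k (by omega) _ rfl]
    have hcons : fcard_n_line_not_exist (line_num - (k : Int)) (remain_n - 4 * (k : Int)) ::
        (List.range' (k + 1) ((remain_n / 4).toNat - k)).map
          (fun (m : Nat) => fcard_n_line_not_exist (line_num - (m : Int)) (remain_n - 4 * (m : Int)))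
        = (List.range' k ((remain_n / 4).toNat + 1 - k)).map
          (fun (m : Nat) => fcard_n_line_not_exist (line_num - (m : Int)) (remain_n - 4 * (m : Int))) := by
      rw [show (remain_n / 4).toNat + 1 - k = ((remain_n / 4).toNat - k) + 1 from by omega,
        List.range'_succ, List.map_cons]
    rw [hcons]
    exact ih (by omega)

lemma pv_final (line_num remain_n : Int)
    (hpre : Pre_fcard_n_line_not_exist line_num remain_n) :
    fcard_n_line_not_exist line_num remain_n = fcard_n_line_not_exist_alt line_num remain_n := by
  unfold Pre_fcard_n_line_not_exist at hpre
  have hfd : ∀ a : Int, PySem.Int.floordiv a 4 = a / 4 :=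
    fun a => PySem.Int.floordiv_eq_ediv_of_pos (by norm_num)
  rw [fcard_n_line_not_exist_alt]
  split_ifs with hb1 hb2 hb3
  · rw [fcard_n_line_not_exist]; simp [hb1]
  · rw [fcard_n_line_not_exist]
    split_ifs <;> first | omega | rw [mul_comm]
  · rw [fcard_n_line_not_exist]
    split_ifs <;> omega
  · have hn4 : 4 ≤ remain_n := by omega
    simp only [hfd]
    have hloop := pv_loop_eq line_num remain_n hn4 ((remain_n / 4).toNat + 1) (le_refl _)
    rw [Nat.sub_self] at hloop
    simp only [List.range'_zero, List.map_nil] at hloop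
    rw [hloop]
    rw [List.range'_succ, List.map_cons, PySem.List.pyGetD_zero_cons]
    norm_num

-- ===== VERDICT (by name: the statement is the Claim_ definition above) =====
theorem fcard_n_line_not_exist_spec : Claim_equal_fcard_n_line_not_exist := by
  intro line_num remain_n _ hpre
  unfold Spec_fcard_n_line_not_exist
  exact pv_final line_num remain_n hpre
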